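-- pv_equiv track=rewrite | github.com/Jonasgrove/protein_clustering_smale_method | ecs129FinalProject4.py | kay3
-- ===== SOURCE A (Python) =====
-- def kay1(matrix, acidA, acidB):
--
--     return (matrix[acidA][acidB])
--
-- def kay2(matrix, sliceSeqA, sliceSeqB):
--     k2 = 1
--
--     for i in range(len(sliceSeqA)):
--         temp = kay1(matrix, sliceSeqA[i], sliceSeqB[i])
--
--         k2 = k2 * temp
--
--     return k2
--
-- def kay3(matrix, seqA, seqB):
--     if len(seqA) <= len(seqB):
--         shorter = seqA
--         longer = seqB
--     else:
--         shorter = seqB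
--         longer = seqA
--
--     k3 = 0
--     counter = 1
--     i = 1
--     s = 0
--     while counter <= min(10, len(shorter)):
--
--         s = 0
--         i = counter
--
--         while i <= len(shorter):
--
--             window = shorter[s:i]
--             j = 0
--
--             while j + len(window) - 1 < len(longer):
--                 k3 = k3 + kay2(matrix, window, longer[j:j + len(window)])
--                 j += 1
--             i += 1
--             s = i - counter
--
--         counter += 1
--
--     return k3
-- ===== SOURCE B (Python) =====
-- def kay3(matrix, seqA, seqB):
--     if len(seqA) <= len(seqB):
--         shorter, longer = seqA, seqB
--     else:
--         shorter, longer = seqB, seqA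
--     cap = min(10, len(shorter))
--     k3 = 0
--     for s in range(len(shorter)):
--         for j in range(len(longer)):
--             prod = 1
--             t = 0
--             while t < cap and s + t < len(shorter) and j + t < len(longer):
--                 prod *= matrix[shorter[s + t]][longer[j + t]]
--                 k3 += prod
--                 t += 1
--     return k3
-- ===== Notes on version B (the rewrite author's own statement) =====
-- stated objective: alternative
-- what changed: Replaces A's length-then-start-then-placement loop nest, which re-multiplies every window from scratch via kay2 on fresh slices, with a loop over start pairs (s, j) whose inner loop extends the window while maintaining a running prefix product, so each window costs one multiplication and no slicing.
import Mathlib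
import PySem

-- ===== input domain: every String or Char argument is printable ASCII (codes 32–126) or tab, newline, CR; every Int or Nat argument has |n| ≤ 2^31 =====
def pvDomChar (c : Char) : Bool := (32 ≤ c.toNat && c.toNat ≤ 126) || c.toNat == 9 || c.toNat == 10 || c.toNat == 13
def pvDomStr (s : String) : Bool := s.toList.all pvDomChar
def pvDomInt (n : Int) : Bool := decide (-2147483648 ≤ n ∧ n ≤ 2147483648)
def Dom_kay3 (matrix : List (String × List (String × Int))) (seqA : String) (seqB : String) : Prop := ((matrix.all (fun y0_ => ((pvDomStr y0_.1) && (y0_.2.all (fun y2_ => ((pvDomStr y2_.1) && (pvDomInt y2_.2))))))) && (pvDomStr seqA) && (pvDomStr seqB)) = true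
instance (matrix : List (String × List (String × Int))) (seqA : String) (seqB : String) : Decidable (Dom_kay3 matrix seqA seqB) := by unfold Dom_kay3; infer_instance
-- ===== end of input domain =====

-- B reorganises A's three nested loops (window length → window start → other start) into loops
-- over the two start positions with an inner extension loop that maintains a running prefix
-- product, so each window product costs one multiplication and no slicing (objective:
-- alternative). Equivalence is proved on Pre_kay3, the inputs where Python A returns
-- instead of raising KeyError.

-- ===== PORT A =====
-- kay1: matrix[acidA][acidB]; a missing key is a Python KeyError, excluded by Pre_kay3
-- (the getD defaults are never read under Pre_kay3).
def kay1 (matrix : List (String × List (String × Int))) (acidA acidB : String) : Int :=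
  PySem.Dict.getD (PySem.Dict.mk (PySem.Dict.getD (PySem.Dict.mk matrix) acidA [])) acidB 0

-- kay2: k2 = 1; for i in range(len(sliceSeqA)): k2 = k2 * kay1(matrix, sliceSeqA[i], sliceSeqB[i])
-- (strings handled as their code-point lists; a 1-character string index becomes String.singleton)
def kay2 (matrix : List (String × List (String × Int))) (sliceSeqA sliceSeqB : List Char) : Int :=
  (List.range sliceSeqA.length).foldl
    (fun (k2 : Int) (i : Nat) =>
      k2 * kay1 matrix
        (String.singleton (PySem.List.pyGetD sliceSeqA (i : Int) ' '))
        (String.singleton (PySem.List.pyGetD sliceSeqB (i : Int) ' ')))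
    1

-- inner `while j + len(window) - 1 < len(longer)` loop of A (condition written as
-- j + len(window) < len(longer) + 1, the same inequality over the integers)
def jLoopA (matrix : List (String × List (String × Int))) (window longer : List Char)
    (j : Nat) (acc : Int) : Int :=
  if j + window.length < longer.length + 1 then
    jLoopA matrix window longer (j + 1)
      (acc + kay2 matrix window
        (PySem.List.slice longer (some (j : Int)) (some ((j : Int) + (window.length : Int)))))
  else acc
termination_by longer.length + 1 - (j + window.length)

-- middle `while i <= len(shorter)` loop of A (s = i - counter is maintained by A's updates)
def iLoopA (matrix : List (String × List (String × Int))) (shorter longer : List Char)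
    (counter i : Nat) (acc : Int) : Int :=
  if i ≤ shorter.length then
    iLoopA matrix shorter longer counter (i + 1)
      (jLoopA matrix (PySem.List.slice shorter (some ((i - counter : Nat) : Int)) (some (i : Int)))
        longer 0 acc)
  else acc
termination_by shorter.length + 1 - i

-- outer `while counter <= min(10, len(shorter))` loop of A
def cLoopA (matrix : List (String × List (String × Int))) (shorter longer : List Char)
    (counter : Nat) (acc : Int) : Int :=
  if counter ≤ min 10 shorter.length then
    cLoopA matrix shorter longer (counter + 1)
      (iLoopA matrix shorter longer counter counter acc)
  else acc
termination_by min 10 shorter.length + 1 - counter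

def kay3 (matrix : List (String × List (String × Int))) (seqA : String) (seqB : String) : Int :=
  if seqA.toList.length ≤ seqB.toList.length then
    cLoopA matrix seqA.toList seqB.toList 1 0
  else
    cLoopA matrix seqB.toList seqA.toList 1 0

-- ===== PORT B =====
-- entryB: the same lookup matrix[c][d] B's Python performs (KeyError excluded by Pre_kay3)
def entryB (matrix : List (String × List (String × Int))) (c d : Char) : Int :=
  PySem.Dict.getD (PySem.Dict.mk (PySem.Dict.getD (PySem.Dict.mk matrix) (String.singleton c) []))
    (String.singleton d) 0

-- inner `while t < cap and s+t < len(shorter) and j+t < len(longer)` loop of B,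
-- maintaining the running prefix product `prod`
def tLoopB (matrix : List (String × List (String × Int))) (shorter longer : List Char)
    (cap s j t : Nat) (prod k3 : Int) : Int :=
  if t < cap ∧ s + t < shorter.length ∧ j + t < longer.length then
    let p := prod * entryB matrix
        (PySem.List.pyGetD shorter ((s + t : Nat) : Int) ' ')
        (PySem.List.pyGetD longer ((j + t : Nat) : Int) ' ')
    tLoopB matrix shorter longer cap s j (t + 1) p (k3 + p)
  else k3
termination_by cap - t

def kay3_alt (matrix : List (String × List (String × Int))) (seqA : String) (seqB : String) : Int :=
  let shorter := if seqA.toList.length ≤ seqB.toList.length then seqA.toList else seqB.toList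
  let longer := if seqA.toList.length ≤ seqB.toList.length then seqB.toList else seqA.toList
  let cap := min 10 shorter.length
  (List.range shorter.length).foldl
    (fun k3 s =>
      (List.range longer.length).foldl
        (fun k3 j => tLoopB matrix shorter longer cap s j 0 1 k3) k3)
    0

-- ===== PRECONDITION & SPEC =====
-- Pre_kay3: exactly the inputs where Python A returns — every character of the shorter
-- sequence is a key of matrix and every character of the longer one a key of each such row
-- (only these pairs are ever looked up; otherwise A raises KeyError).
def Pre_kay3 (matrix : List (String × List (String × Int))) (seqA : String) (seqB : String) : Prop :=
  ((if seqA.toList.length ≤ seqB.toList.length then seqA.toList else seqB.toList).all (fun c =>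
    (if seqA.toList.length ≤ seqB.toList.length then seqB.toList else seqA.toList).all (fun d =>
      ((PySem.Dict.get? (PySem.Dict.mk matrix) (String.singleton c)).bind
        (fun row => PySem.Dict.get? (PySem.Dict.mk row) (String.singleton d))).isSome))) = true
instance (matrix : List (String × List (String × Int))) (seqA : String) (seqB : String) : Decidable (Pre_kay3 matrix seqA seqB) := by unfold Pre_kay3; infer_instance

def pvWitness_kay3 : (List (String × List (String × Int))) × String × String :=
  ([("a", [("a", 2), ("b", 3)]), ("b", [("a", 5), ("b", 7)])], "ab", "ba")

def Spec_kay3 (matrix : List (String × List (String × Int))) (seqA : String) (seqB : String) (out : Int) : Prop := out = kay3_alt matrix seqA seqB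
instance (matrix : List (String × List (String × Int))) (seqA : String) (seqB : String) (out : Int) : Decidable (Spec_kay3 matrix seqA seqB out) := by unfold Spec_kay3; infer_instance

-- ===== CLAIM (what is proved, stated in full; the proofs are below) =====
def Claim_equal_kay3 : Prop := ∀ (matrix : List (String × List (String × Int))) (seqA : String) (seqB : String), Dom_kay3 matrix seqA seqB → Pre_kay3 matrix seqA seqB → Spec_kay3 matrix seqA seqB (kay3 matrix seqA seqB)

-- ===== LEMMAS AND PROOFS =====

-- matrix entry for a pair of characters (what both ports look up)
lemma kay1_singleton (m : List (String × List (String × Int))) (c d : Char) :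
    kay1 m (String.singleton c) (String.singleton d) = entryB m c d := rfl

-- the coefficient of window (s, j, length n): product of the n diagonal matrix entries
def Gfun (m : List (String × List (String × Int))) (S L : List Char) (s j v : Nat) : Int :=
  entryB m (S.getD (s + v) ' ') (L.getD (j + v) ' ')

def Pw (m : List (String × List (String × Int))) (S L : List Char) (s j n : Nat) : Int :=
  ∏ v ∈ Finset.range n, Gfun m S L s j v

-- number of window lengths available at start pair (s, j)
def Tlen (S L : List Char) (s j : Nat) : Nat :=
  min (min 10 S.length) (min (S.length - s) (L.length - j))

-- the common value of both programs, as a triple sum over start pairs and lengths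
def CSum (m : List (String × List (String × Int))) (S L : List Char) : Int :=
  ∑ s ∈ Finset.range S.length, ∑ j ∈ Finset.range L.length,
    ∑ u ∈ Finset.range (Tlen S L s j), Pw m S L s j (u + 1)

lemma foldl_mul_eq (g : Nat → Int) (l : List Nat) : ∀ c : Int,
    l.foldl (fun a x => a * g x) c = c * (l.map g).prod := by
  induction l with
  | nil => simp
  | cons x xs ih => intro c; simp only [List.foldl_cons, List.map_cons, List.prod_cons, ih, mul_assoc]

lemma list_sum_range (f : Nat → Int) (n : Nat) :
    ((List.range n).map f).sum = ∑ i ∈ Finset.range n, f i := rfl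

lemma list_prod_range (f : Nat → Int) (n : Nat) :
    ((List.range n).map f).prod = ∏ i ∈ Finset.range n, f i := rfl

lemma sum_range_ite (n B : Nat) (f : Nat → Int) :
    ∑ x ∈ Finset.range n, (if x < B then f x else 0) = ∑ x ∈ Finset.range (min B n), f x := by
  rw [← Finset.sum_filter]
  apply Finset.sum_congr _ (fun _ _ => rfl)
  ext x; simp [Finset.mem_filter, Finset.mem_range]; omega

-- kay2 on an in-range pair of aligned windows is the coefficient Pw
lemma kay2_eq_Pw (m : List (String × List (String × Int))) (S L : List Char) (s j n : Nat)
    (hs : s + n ≤ S.length) :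
    kay2 m ((S.drop s).take n) ((L.drop j).take n) = Pw m S L s j n := by
  have hlen : ((S.drop s).take n).length = n := by simp; omega
  unfold kay2 Pw
  rw [hlen, foldl_mul_eq, one_mul, list_prod_range]
  apply Finset.prod_congr rfl
  intro v hv
  rw [Finset.mem_range] at hv
  rw [PySem.List.pyGetD_natCast, PySem.List.pyGetD_natCast, kay1_singleton]
  unfold Gfun
  congr 1
  · simp [List.getD_eq_getElem?_getD, List.getElem?_take_of_lt hv, List.getElem?_drop]
  · simp [List.getD_eq_getElem?_getD, List.getElem?_take_of_lt hv, List.getElem?_drop]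

lemma shift_sum (f : Nat → Int) (a n : Nat) :
    ∑ k ∈ Finset.range n, f (a + (k + 1)) = ∑ k ∈ Finset.range n, f (a + 1 + k) :=
  Finset.sum_congr rfl (fun k _ => by rw [show a + (k + 1) = a + 1 + k by omega])

lemma peel_sum (f : Nat → Int) (a n : Nat) :
    ∑ k ∈ Finset.range (n + 1), f (a + k)
      = (∑ k ∈ Finset.range n, f (a + 1 + k)) + f a := by
  rw [Finset.sum_range_succ']
  exact congrArg (· + f (a + 0)) (shift_sum f a n)

-- A's innermost while loop: the sum over all placements j of the current window in longer
def JV (m : List (String × List (String × Int))) (w L : List Char) : Int :=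
  ∑ q ∈ Finset.range (L.length + 1 - w.length), kay2 m w ((L.drop q).take w.length)

lemma jLoopA_eq (m : List (String × List (String × Int))) (w L : List Char) :
    ∀ (n j : Nat) (acc : Int), L.length + 1 - (j + w.length) = n →
      jLoopA m w L j acc = acc + ∑ k ∈ Finset.range n,
        kay2 m w ((L.drop (j + k)).take w.length) := by
  intro n
  induction n with
  | zero =>
    intro j acc hn
    rw [jLoopA, if_neg (by omega)]
    simp
  | succ n ih =>
    intro j acc hn
    rw [jLoopA, if_pos (by omega)]
    rw [PySem.List.slice_natCast_add]
    rw [ih (j + 1) _ (by omega)]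
    have hsplit : ∑ k ∈ Finset.range (n + 1), kay2 m w ((L.drop (j + k)).take w.length)
        = (∑ k ∈ Finset.range n, kay2 m w ((L.drop (j + 1 + k)).take w.length))
          + kay2 m w ((L.drop j).take w.length) :=
      peel_sum (fun x => kay2 m w ((L.drop x).take w.length)) j n
    rw [hsplit]
    ring

lemma jLoopA_zero (m : List (String × List (String × Int))) (w L : List Char) (acc : Int) :
    jLoopA m w L 0 acc = acc + JV m w L := by
  rw [jLoopA_eq m w L (L.length + 1 - (0 + w.length)) 0 acc rfl]
  unfold JV
  congr 1
  apply Finset.sum_congr (by rw [Nat.zero_add]) (fun q _ => by rw [Nat.zero_add])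

-- A's window at loop state (counter, i)
def WIN (S : List Char) (c i : Nat) : List Char :=
  PySem.List.slice S (some ((i - c : Nat) : Int)) (some ((i : Nat) : Int))

lemma iLoopA_eq (m : List (String × List (String × Int))) (S L : List Char) (c : Nat) :
    ∀ (n i : Nat) (acc : Int), S.length + 1 - i = n →
      iLoopA m S L c i acc = acc + ∑ k ∈ Finset.range n, JV m (WIN S c (i + k)) L := by
  intro n
  induction n with
  | zero =>
    intro i acc hn
    rw [iLoopA, if_neg (by omega)]
    simp
  | succ n ih =>
    intro i acc hn
    rw [iLoopA, if_pos (by omega)]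
    rw [ih (i + 1) _ (by omega), jLoopA_zero]
    have hsplit : ∑ k ∈ Finset.range (n + 1), JV m (WIN S c (i + k)) L
        = (∑ k ∈ Finset.range n, JV m (WIN S c (i + 1 + k)) L) + JV m (WIN S c i) L :=
      peel_sum (fun x => JV m (WIN S c x) L) i n
    rw [hsplit]
    unfold WIN
    ring

def IV (m : List (String × List (String × Int))) (S L : List Char) (c : Nat) : Int :=
  ∑ k ∈ Finset.range (S.length + 1 - c), JV m (WIN S c (c + k)) L

lemma cLoopA_eq (m : List (String × List (String × Int))) (S L : List Char) :
    ∀ (n c : Nat) (acc : Int), min 10 S.length + 1 - c = n →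
      cLoopA m S L c acc = acc + ∑ k ∈ Finset.range n, IV m S L (c + k) := by
  intro n
  induction n with
  | zero =>
    intro c acc hn
    rw [cLoopA, if_neg (by omega)]
    simp
  | succ n ih =>
    intro c acc hn
    rw [cLoopA, if_pos (by omega)]
    rw [ih (c + 1) _ (by omega), iLoopA_eq m S L c (S.length + 1 - c) c _ rfl]
    have hsplit : ∑ k ∈ Finset.range (n + 1), IV m S L (c + k)
        = (∑ k ∈ Finset.range n, IV m S L (c + 1 + k)) + IV m S L c :=
      peel_sum (fun x => IV m S L x) c n
    rw [hsplit]
    unfold IV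
    ring

lemma IV_eq (m : List (String × List (String × Int))) (S L : List Char) (k : Nat) :
    IV m S L (k + 1) = ∑ s ∈ Finset.range (S.length - k),
      ∑ q ∈ Finset.range (L.length - k), Pw m S L s q (k + 1) := by
  unfold IV
  rw [show S.length + 1 - (k + 1) = S.length - k by omega]
  apply Finset.sum_congr rfl
  intro s hs
  rw [Finset.mem_range] at hs
  have hwin : WIN S (k + 1) (k + 1 + s) = (S.drop s).take (k + 1) := by
    unfold WIN
    rw [show k + 1 + s - (k + 1) = s by omega, PySem.List.slice_natCast,
      show k + 1 + s - s = k + 1 by omega]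
  rw [hwin]
  have hwl : ((S.drop s).take (k + 1)).length = k + 1 := by simp; omega
  unfold JV
  rw [hwl, show L.length + 1 - (k + 1) = L.length - k by omega]
  apply Finset.sum_congr rfl
  intro q hq
  rw [Finset.mem_range] at hq
  exact kay2_eq_Pw m S L s q (k + 1) (by omega)

-- A's total, reorganised: window length first, then both starts
lemma A_canon (m : List (String × List (String × Int))) (S L : List Char) :
    cLoopA m S L 1 0 = ∑ k ∈ Finset.range (min 10 S.length),
      ∑ s ∈ Finset.range (S.length - k), ∑ q ∈ Finset.range (L.length - k),
        Pw m S L s q (k + 1) := by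
  rw [cLoopA_eq m S L (min 10 S.length + 1 - 1) 1 0 rfl, zero_add,
    show min 10 S.length + 1 - 1 = min 10 S.length by omega]
  apply Finset.sum_congr rfl
  intro k hk
  rw [show (1 : Nat) + k = k + 1 by omega]
  exact IV_eq m S L k

lemma shift_prod (f : Nat → Int) (a n : Nat) :
    ∏ v ∈ Finset.range n, f (a + (v + 1)) = ∏ v ∈ Finset.range n, f (a + 1 + v) :=
  Finset.prod_congr rfl (fun v _ => by rw [show a + (v + 1) = a + 1 + v by omega])

lemma peel_prod (f : Nat → Int) (a n : Nat) :
    ∏ v ∈ Finset.range (n + 1), f (a + v) = f a * ∏ v ∈ Finset.range n, f (a + 1 + v) := by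
  rw [Finset.prod_range_succ', mul_comm]
  exact congrArg (f (a + 0) * ·) (shift_prod f a n)

lemma tLoopB_eq (m : List (String × List (String × Int))) (S L : List Char) (cap s j : Nat) :
    ∀ (n t : Nat) (prod k3 : Int), min cap (min (S.length - s) (L.length - j)) - t = n →
      tLoopB m S L cap s j t prod k3 = k3 + ∑ u ∈ Finset.range n,
        prod * ∏ v ∈ Finset.range (u + 1), Gfun m S L s j (t + v) := by
  intro n
  induction n with
  | zero =>
    intro t prod k3 hn
    rw [tLoopB, if_neg (by omega)]
    simp
  | succ n ih =>
    intro t prod k3 hn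
    rw [tLoopB, if_pos (by omega)]
    show tLoopB m S L cap s j (t + 1)
        (prod * entryB m (PySem.List.pyGetD S ((s + t : Nat) : Int) ' ')
          (PySem.List.pyGetD L ((j + t : Nat) : Int) ' '))
        (k3 + prod * entryB m (PySem.List.pyGetD S ((s + t : Nat) : Int) ' ')
          (PySem.List.pyGetD L ((j + t : Nat) : Int) ' ')) = _
    have hG : entryB m (PySem.List.pyGetD S ((s + t : Nat) : Int) ' ')
        (PySem.List.pyGetD L ((j + t : Nat) : Int) ' ') = Gfun m S L s j t := by
      rw [PySem.List.pyGetD_natCast, PySem.List.pyGetD_natCast]; rfl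
    rw [hG, ih (t + 1) _ _ (by omega), Finset.sum_range_succ']
    have hlast : prod * ∏ v ∈ Finset.range (0 + 1), Gfun m S L s j (t + v)
        = prod * Gfun m S L s j t := by rw [Finset.prod_range_one, Nat.add_zero]
    have hterm : ∀ u ∈ Finset.range n,
        prod * ∏ v ∈ Finset.range (u + 1 + 1), Gfun m S L s j (t + v)
          = (prod * Gfun m S L s j t) * ∏ v ∈ Finset.range (u + 1), Gfun m S L s j (t + 1 + v) := by
      intro u _
      have h2 := peel_prod (fun x => Gfun m S L s j x) t (u + 1)
      rw [h2, mul_assoc]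
    rw [Finset.sum_congr rfl hterm, hlast]
    ring

-- B's total: over start pairs, then lengths
lemma foldB (m : List (String × List (String × Int))) (S L : List Char) :
    (List.range S.length).foldl
      (fun k3 s => (List.range L.length).foldl
        (fun k3 j => tLoopB m S L (min 10 S.length) s j 0 1 k3) k3) 0 = CSum m S L := by
  have h1 : ∀ (s j : Nat) (k3 : Int), tLoopB m S L (min 10 S.length) s j 0 1 k3
      = k3 + ∑ u ∈ Finset.range (Tlen S L s j), Pw m S L s j (u + 1) := by
    intro s j k3
    rw [tLoopB_eq m S L (min 10 S.length) s j (Tlen S L s j) 0 1 k3 (by unfold Tlen; omega)]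
    congr 1
    apply Finset.sum_congr rfl
    intro u _
    rw [one_mul]
    unfold Pw
    exact Finset.prod_congr rfl (fun v _ => by rw [Nat.zero_add])
  have hin : ∀ (s : Nat) (k3 : Int), (List.range L.length).foldl
      (fun k3 j => tLoopB m S L (min 10 S.length) s j 0 1 k3) k3
      = k3 + ∑ j ∈ Finset.range L.length, ∑ u ∈ Finset.range (Tlen S L s j), Pw m S L s j (u + 1) := by
    intro s k3
    simp only [h1]
    rw [PySem.List.foldl_add, list_sum_range]
  simp only [hin]
  rw [PySem.List.foldl_add, list_sum_range, zero_add]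
  rfl

-- the exchange of summation orders: by window length first (A) = by start pair first (B)
lemma exchange (m : List (String × List (String × Int))) (S L : List Char) :
    ∑ k ∈ Finset.range (min 10 S.length), ∑ s ∈ Finset.range (S.length - k),
      ∑ q ∈ Finset.range (L.length - k), Pw m S L s q (k + 1) = CSum m S L := by
  unfold CSum
  have h1 : ∀ k ∈ Finset.range (min 10 S.length),
      ∑ s ∈ Finset.range (S.length - k), ∑ q ∈ Finset.range (L.length - k), Pw m S L s q (k + 1)
        = ∑ s ∈ Finset.range S.length, ∑ q ∈ Finset.range L.length,
            (if s < S.length - k ∧ q < L.length - k then Pw m S L s q (k + 1) else 0) := by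
    intro k _
    conv_lhs => rw [show S.length - k = min (S.length - k) S.length by omega]
    rw [← sum_range_ite]
    apply Finset.sum_congr rfl
    intro s _
    by_cases hsA : s < S.length - k
    · rw [if_pos hsA]
      conv_lhs => rw [show L.length - k = min (L.length - k) L.length by omega]
      rw [← sum_range_ite]
      exact Finset.sum_congr rfl (fun q _ => by
        by_cases hq : q < L.length - k <;> simp [hsA, hq])
    · rw [if_neg hsA]
      exact (Finset.sum_eq_zero (fun q _ => by rw [if_neg (by omega)])).symm
  rw [Finset.sum_congr rfl h1, Finset.sum_comm]
  apply Finset.sum_congr rfl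
  intro s _
  rw [Finset.sum_comm]
  apply Finset.sum_congr rfl
  intro q _
  have hcond : ∀ kk : Nat, (s < S.length - kk ∧ q < L.length - kk)
      ↔ kk < min (S.length - s) (L.length - q) := by intro kk; omega
  rw [Finset.sum_congr rfl (fun kk _ => if_congr (hcond kk) rfl rfl), sum_range_ite,
    show min (min (S.length - s) (L.length - q)) (min 10 S.length) = Tlen S L s q by
      unfold Tlen; omega]

-- ===== VERDICT (by name: the statement is the Claim_ definition above) =====
theorem kay3_spec : Claim_equal_kay3 := by
  intro matrix seqA seqB _ _
  unfold Spec_kay3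
  simp only [kay3, kay3_alt]
  by_cases h : seqA.toList.length ≤ seqB.toList.length <;>
    simp only [h, if_true, if_false] <;>
    rw [A_canon, exchange, foldB]
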